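-- pv_equiv track=rewrite | github.com/Bundaberg-Joey/MTGINDEX | MTTOOLS/Card_Database_Creator.py | card_name_corrector
-- ===== SOURCE A (Python) =====
-- from collections import Counter  # used to version card names
--
-- def mkm_syntax_fixer(card_name):
--     """
--     Given the name of a card from MTGJSON, will update the string with the correct syntax for URL (i.e. " " --> "-")
--     :param card_name: a string potentially containing string elements which need to be updated
--     :return: a string where any string elements present in the below dictionary will have been converted to the fix
--     """
--     syntax_fixes = {" ": "-", ":": "", "'": "-", ".": "", ",": "", "--": "-"}  # dict of present:replacement
--     for fix in syntax_fixes:  # for every punctuation key in the syntax list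
--         if fix in card_name:  # if this bit of punctuation is present
--             card_name = card_name.replace(fix, syntax_fixes[fix])  # replace with the appropriate fix
--     return card_name
--
-- def card_name_corrector(card_names):
--     """
--     For multiple cards in the same MTG set, mkm will list them as different versions so need to update the card name
--     The card name will also have any grammatical syntax updated as per the syntax fixer function
--     :param card_names: a list/panda series of strings (in this instance card names)
--     :return: a list of strings, list contains updated card version numbers and syntax if required
--     """
--     set_cards = Counter(card_names)  # take names from panda series and convert to Counter object
--     duplicate_names = {card:set_cards[card] for card in set_cards if set_cards[card] != 1}  # only have unique entries
--
--     corrected_card_names = []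
--     for card in card_names:  # so for every card name in the series of cards passed
--         if card in duplicate_names and duplicate_names[card] != 0:  # if card has duplicates in set and the count != 0
--             versioned_name = f'{card}-Version-{duplicate_names[card]}'  # create versioned card name
--             corrected_card_names.append(mkm_syntax_fixer(versioned_name))  # update syntax & add to list to be returned
--             duplicate_names[card] -=1  # update the counter dictionary
--         else:
--             corrected_card_names.append(mkm_syntax_fixer(card))  # catches unique cards & adds corrected names to list
--
--     return corrected_card_names
-- ===== SOURCE B (Python) =====
-- def mkm_syntax_fixer(card_name):
--     """Apply mkm URL syntax fixes to a card name."""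
--     syntax_fixes = {" ": "-", ":": "", "'": "-", ".": "", ",": "", "--": "-"}
--     for fix in syntax_fixes:
--         if fix in card_name:
--             card_name = card_name.replace(fix, syntax_fixes[fix])
--     return card_name
--
-- def card_name_corrector(card_names):
--     # Grouped-scatter strategy: one pass builds an index table name -> positions,
--     # then each group's positions are written straight into a pre-allocated result.
--     names = list(card_names)
--     groups = {}
--     for i, name in enumerate(names):
--         groups.setdefault(name, []).append(i)
--     result = [""] * len(names)
--     for name, idxs in groups.items():
--         k = len(idxs)
--         for j, idx in enumerate(idxs):
--             result[idx] = mkm_syntax_fixer(name if k == 1 else f'{name}-Version-{k - j}')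
--     return result
-- ===== Notes on version B (the rewrite author's own statement) =====
-- stated objective: alternative
-- what changed: Replaces A's Counter plus sequential decrement-as-you-go pass with a grouped scatter: one pass builds an index table name->positions, then each group's versioned names are written directly into a pre-allocated result by position.
import Mathlib
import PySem

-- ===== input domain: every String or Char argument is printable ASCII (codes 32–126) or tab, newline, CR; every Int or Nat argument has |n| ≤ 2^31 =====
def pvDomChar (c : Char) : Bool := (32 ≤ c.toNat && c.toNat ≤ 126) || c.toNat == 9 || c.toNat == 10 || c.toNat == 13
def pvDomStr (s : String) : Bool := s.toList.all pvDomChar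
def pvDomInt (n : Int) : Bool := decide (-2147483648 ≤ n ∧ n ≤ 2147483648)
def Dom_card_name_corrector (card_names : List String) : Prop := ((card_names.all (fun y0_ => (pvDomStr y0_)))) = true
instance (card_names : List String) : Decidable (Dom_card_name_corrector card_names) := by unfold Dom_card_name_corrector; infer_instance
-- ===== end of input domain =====

-- B replaces A's Counter plus decrement-as-you-go sequential pass by a grouped scatter
-- (index table name -> positions, then positional writes into a pre-allocated result); objective: alternative.

-- ===== PORT A =====
-- shared helper: port of mkm_syntax_fixer (identical helper in Source A and Source B)
def mkmFix (s : String) : String :=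
  [(" ", "-"), (":", ""), ("'", "-"), (".", ""), (",", ""), ("--", "-")].foldl
    (fun cn p => if PySem.Str.isIn p.1 cn then PySem.Str.replace cn p.1 p.2 else cn) s

def card_name_corrector (card_names : List String) : List String :=
  let set_cards : PySem.Dict String Int := PySem.Dict.counter card_names
  let duplicate_names : PySem.Dict String Int :=
    set_cards.keys.foldl
      (fun d card => if set_cards.getD card 0 ≠ 1 then d.insert card (set_cards.getD card 0) else d)
      PySem.Dict.empty
  (card_names.foldl
    (fun (st : List String × PySem.Dict String Int) card =>
      if st.2.contains card && (st.2.getD card 0 != 0) then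
        (st.1 ++ [mkmFix (card ++ "-Version-" ++ PySem.Int.toStr (st.2.getD card 0))],
         st.2.insert card (st.2.getD card 0 - 1))
      else (st.1 ++ [mkmFix card], st.2))
    ([], duplicate_names)).1

-- ===== PORT B =====
-- hand port of Python's list assignment "result[idx] = v"; exact for 0 ≤ idx < len(result),
-- the only case reached here (every idx comes from enumerate over the positions of result)
def setItem (xs : List String) (i : Int) (v : String) : List String := xs.set i.toNat v

-- body of B's outer loop: scatter one group's versioned names into the result
def writeGroup (res : List String) (pr : String × List Int) : List String :=
  (PySem.List.enumerate pr.2 0).foldl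
    (fun r q =>
      setItem r q.2 (mkmFix (if (pr.2.length : Int) == 1 then pr.1
        else pr.1 ++ "-Version-" ++ PySem.Int.toStr ((pr.2.length : Int) - q.1))))
    res

def card_name_corrector_alt (card_names : List String) : List String :=
  let groups : PySem.Dict String (List Int) :=
    (PySem.List.enumerate card_names 0).foldl
      (fun g p => g.modify p.2 [] (fun l => l ++ [p.1])) PySem.Dict.empty
  groups.items.foldl writeGroup (List.replicate card_names.length "")

-- ===== PRECONDITION & SPEC =====
def Spec_card_name_corrector (card_names : List String) (out : List String) : Prop := out = card_name_corrector_alt card_names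
instance (card_names : List String) (out : List String) : Decidable (Spec_card_name_corrector card_names out) := by unfold Spec_card_name_corrector; infer_instance

-- ===== CLAIM (what is proved, stated in full; the proofs are below) =====
def Claim_equal_card_name_corrector : Prop := ∀ (card_names : List String), Dom_card_name_corrector card_names → Spec_card_name_corrector card_names (card_name_corrector card_names)

-- ===== LEMMAS AND PROOFS =====

-- the common per-position description both programs compute: position i of the output
def specF (full : List String) (i : Nat) : String :=
  if full.count (full.getD i "") = 1 then mkmFix (full.getD i "")
  else mkmFix (full.getD i "" ++ "-Version-" ++
        PySem.Int.toStr (((full.drop i).count (full.getD i "") : Nat) : Int))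

-- positions (as Python ints, offset s) at which `name` occurs in a list
def occI (name : String) : List String → Int → List Int
  | [], _ => []
  | c :: t, s => if c == name then s :: occI name t (s + 1) else occI name t (s + 1)

lemma occI_eq_filter (name : String) : ∀ (l : List String) (s : Int),
    ((PySem.List.enumerate l s).filter (fun p => p.2 == name)).map (·.1) = occI name l s := by
  intro l
  induction l with
  | nil => intro s; simp [occI, PySem.List.enumerate_nil]
  | cons c t ih =>
      intro s
      simp only [PySem.List.enumerate_cons, List.filter_cons]
      by_cases h : c = name
      · subst h; simp [occI, ih]
      · have hb : (c == name) = false := by simpa using h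
        simp [occI, hb, ih]

lemma occI_bounds (name : String) : ∀ (l : List String) (s e : Int),
    e ∈ occI name l s → s ≤ e ∧ e < s + l.length := by
  intro l
  induction l with
  | nil => intro s e h; simp [occI] at h
  | cons c t ih =>
      intro s e h
      simp only [occI] at h
      split at h
      · rcases List.mem_cons.1 h with rfl | h'
        · refine ⟨le_refl _, ?_⟩
          simp only [List.length_cons]
          push_cast
          omega
        · obtain ⟨ha, hb⟩ := ih (s + 1) e h'
          simp only [List.length_cons]
          push_cast at hb ⊢
          omega
      · obtain ⟨ha, hb⟩ := ih (s + 1) e h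
        simp only [List.length_cons]
        push_cast at hb ⊢
        omega

lemma length_occI (name : String) : ∀ (l : List String) (s : Int),
    (occI name l s).length = l.count name := by
  intro l
  induction l with
  | nil => intro s; simp [occI]
  | cons c t ih =>
      intro s
      simp only [occI, List.count_cons]
      split <;> simp_all

lemma getElem_occI (name : String) : ∀ (l : List String) (s : Int) (j : Nat)
    (h : j < (occI name l s).length),
    0 ≤ (occI name l s)[j] - s ∧
    ((occI name l s)[j] - s).toNat < l.length ∧
    l.getD ((occI name l s)[j] - s).toNat "" = name ∧
    (l.drop ((occI name l s)[j] - s).toNat).count name = l.count name - j := by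
  intro l
  induction l with
  | nil => intro s j h; simp [occI] at h
  | cons c t ih =>
      intro s j h
      by_cases hc : c = name
      · subst hc
        simp only [occI, beq_self_eq_true, if_true] at h ⊢
        match j with
        | 0 => simp
        | j + 1 =>
            have h' : j < (occI c t (s + 1)).length := by simpa using h
            obtain ⟨h1, h2, h3, h4⟩ := ih (s + 1) j h'
            have he : (occI c t (s + 1))[j] - s = ((occI c t (s + 1))[j] - (s + 1)) + 1 := by ring
            simp only [List.getElem_cons_succ, he]
            have ht : (((occI c t (s + 1))[j] - (s + 1)) + 1).toNat
                = ((occI c t (s + 1))[j] - (s + 1)).toNat + 1 := by omega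
            rw [ht]
            refine ⟨by omega, by simpa using h2, by simpa using h3, ?_⟩
            simp only [List.drop_succ_cons, List.count_cons, h4, beq_self_eq_true, if_true]
            omega
      · have hcb : (c == name) = false := by simpa using hc
        have hocc : occI name (c :: t) s = occI name t (s + 1) := by simp [occI, hcb]
        have h' : j < (occI name t (s + 1)).length := hocc ▸ h
        obtain ⟨h1, h2, h3, h4⟩ := ih (s + 1) j h'
        rw [List.getElem_of_eq hocc h]
        have he : (occI name t (s + 1))[j]'h' - s
            = ((occI name t (s + 1))[j]'h' - (s + 1)) + 1 := by ring
        rw [he]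
        have ht : (((occI name t (s + 1))[j]'h' - (s + 1)) + 1).toNat
            = ((occI name t (s + 1))[j]'h' - (s + 1)).toNat + 1 := by omega
        rw [ht]
        refine ⟨by omega, by simpa using h2, by simpa using h3, ?_⟩
        simp only [List.drop_succ_cons, List.count_cons, h4, hcb, Bool.false_eq_true, if_false]
        omega

lemma mem_occI_self : ∀ (l : List String) (s : Int) (i : Nat) (h : i < l.length),
    (s + (i : Int)) ∈ occI (l[i]) l s := by
  intro l
  induction l with
  | nil => intro s i h; simp at h
  | cons c t ih =>
      intro s i h
      match i with
      | 0 => simp [occI]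
      | i + 1 =>
          have hm := ih (s + 1) i (by simpa using h)
          simp only [occI, List.getElem_cons_succ]
          have hcast : s + ((i + 1 : Nat) : Int) = (s + 1) + (i : Int) := by push_cast; ring
          rw [hcast]
          split
          · exact List.mem_cons_of_mem _ hm
          · exact hm

-- lookup after a guarded-insert loop over keys (A's dict comprehension)
lemma get?_foldl_insert_if (P : String → Prop) [DecidablePred P] (v : String → Int) :
    ∀ (ks : List String) (d : PySem.Dict String Int) (x : String),
    (ks.foldl (fun d k => if P k then d.insert k (v k) else d) d).get? x
      = if x ∈ ks ∧ P x then some (v x) else d.get? x := by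
  intro ks
  induction ks with
  | nil => intro d x; simp
  | cons k ks ih =>
      intro d x
      simp only [List.foldl_cons]
      rw [ih]
      by_cases h1 : x ∈ ks ∧ P x
      · simp [h1, List.mem_cons]
      · by_cases hP : P k
        · rw [if_neg h1, if_pos hP, PySem.Dict.get?_insert]
          by_cases hxk : x = k
          · subst hxk
            simp [hP]
          · simp only [if_neg hxk]
            rw [if_neg]
            rintro ⟨hm, hPx⟩
            rcases List.mem_cons.1 hm with rfl | hm'
            · exact hxk rfl
            · exact h1 ⟨hm', hPx⟩
        · rw [if_neg h1, if_neg hP, if_neg]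
          rintro ⟨hm, hPx⟩
          rcases List.mem_cons.1 hm with rfl | hm'
          · exact hP hPx
          · exact h1 ⟨hm', hPx⟩

lemma range_map_shift (f : Nat → String) (n m : Nat) :
    (List.range (n + 1)).map (fun j => f (m + j))
      = f m :: (List.range n).map (fun j => f ((m + 1) + j)) := by
  rw [List.range_succ_eq_map]
  simp only [List.map_cons, List.map_map]
  refine congrArg₂ _ (by simp) (List.map_congr_left ?_)
  intro j _
  exact congrArg f (by omega)

lemma getD_append_cons (pre t : List String) (c : String) :
    (pre ++ c :: t).getD pre.length "" = c := by
  simp [List.getD_eq_getElem?_getD]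

-- invariant run of A's main loop
lemma A_loop (full : List String) : ∀ (rest pre acc : List String) (d : PySem.Dict String Int),
    full = pre ++ rest →
    (∀ x, d.get? x = if full.count x ≤ 1 then none else some ((rest.count x : Nat) : Int)) →
    (rest.foldl
      (fun (st : List String × PySem.Dict String Int) card =>
        if st.2.contains card && (st.2.getD card 0 != 0) then
          (st.1 ++ [mkmFix (card ++ "-Version-" ++ PySem.Int.toStr (st.2.getD card 0))],
           st.2.insert card (st.2.getD card 0 - 1))
        else (st.1 ++ [mkmFix card], st.2))
      (acc, d)).1 = acc ++ (List.range rest.length).map (fun j => specF full (pre.length + j)) := by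
  intro rest
  induction rest with
  | nil => intro pre acc d _ _; simp
  | cons c t ih =>
      intro pre acc d hfull hinv
      have hcnt : 1 ≤ full.count c := by
        rw [hfull]
        simp [List.count_append]
        omega
      have hspec0 : full.getD pre.length "" = c := hfull ▸ getD_append_cons pre t c
      have hdrop : full.drop pre.length = c :: t := by
        rw [hfull, List.drop_left]
      simp only [List.foldl_cons, List.length_cons]
      rw [range_map_shift]
      by_cases hle : full.count c ≤ 1
      · -- unique card: not in duplicate_names
        have hg : d.get? c = none := by rw [hinv c, if_pos hle]
        have hcontains : d.contains c = false := by
          rw [PySem.Dict.contains_eq_isSome_get?, hg]; rfl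
        rw [if_neg (by simp [hcontains])]
        have hsp : specF full pre.length = mkmFix c := by
          unfold specF
          rw [hspec0, if_pos (by omega)]
        rw [ih (pre ++ [c]) (acc ++ [mkmFix c]) d (by simp [hfull])]
        · simp [hsp]
        · intro x
          rw [hinv x]
          by_cases hxc : x = c
          · subst hxc; simp [hle]
          · simp [Ne.symm hxc]
      · -- duplicated card
        have hg : d.get? c = some ((t.count c + 1 : Nat) : Int) := by
          rw [hinv c, if_neg hle]
          simp
        have hcontains : d.contains c = true := by
          rw [PySem.Dict.contains_eq_isSome_get?, hg]; rfl
        have hgetD : d.getD c 0 = ((t.count c + 1 : Nat) : Int) :=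
          PySem.Dict.getD_of_get?_eq_some d 0 hg
        have hvne : ((t.count c + 1 : Nat) : Int) ≠ 0 := by push_cast; omega
        rw [if_pos (show (d.contains c && (d.getD c 0 != 0)) = true from by
          rw [hcontains, hgetD]; simpa using hvne)]
        have hsp : specF full pre.length
            = mkmFix (c ++ "-Version-" ++ PySem.Int.toStr ((t.count c + 1 : Nat) : Int)) := by
          unfold specF
          rw [hspec0, if_neg (by omega), hdrop]
          simp
        rw [hgetD]
        rw [ih (pre ++ [c]) _ _ (by simp [hfull])]
        · simp [hsp]
        · intro x
          by_cases hxc : x = c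
          · subst hxc
            rw [PySem.Dict.get?_insert_self, if_neg hle]
            congr 1
            push_cast
            ring
          · rw [PySem.Dict.get?_insert, if_neg hxc, hinv x]
            simp [List.count_cons, Ne.symm hxc]

lemma A_eq_spec (names : List String) :
    card_name_corrector names = (List.range names.length).map (specF names) := by
  unfold card_name_corrector
  rw [A_loop names names [] [] _ rfl]
  · simp
  · intro x
    rw [get?_foldl_insert_if (fun k => (PySem.Dict.counter names).getD k 0 ≠ 1)
        (fun k => (PySem.Dict.counter names).getD k 0)]
    rw [PySem.Dict.get?_empty]
    simp only [PySem.Dict.getD_counter, PySem.Dict.keys_counter, PySem.Set.mem_ofList]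
    have hmem : x ∈ names ↔ 0 < names.count x := (List.count_pos_iff).symm
    by_cases hle : names.count x ≤ 1
    · rw [if_pos hle, if_neg]
      rintro ⟨hm, hne⟩
      have : 0 < names.count x := hmem.1 hm
      have h1 : names.count x = 1 := by omega
      exact hne (by rw [h1]; rfl)
    · rw [if_neg hle, if_pos]
      refine ⟨hmem.2 (by omega), ?_⟩
      intro h
      have : names.count x = 1 := by exact_mod_cast h
      omega

-- generic scatter lemma: a run of positional writes whose value only depends on the position
lemma foldl_setItem_spec (g : Int × Int → String) (F : Nat → String) :
    ∀ (ps : List (Int × Int)) (res : List String),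
    (∀ p ∈ ps, 0 ≤ p.2 ∧ p.2.toNat < res.length ∧ g p = F p.2.toNat) →
    ((ps.foldl (fun r p => setItem r p.2 (g p)) res).length = res.length ∧
     ∀ i : Nat, (ps.foldl (fun r p => setItem r p.2 (g p)) res)[i]? =
       if ps.any (fun p => p.2 == (i : Int)) then some (F i) else res[i]?) := by
  intro ps
  induction ps with
  | nil => intro res _; simp
  | cons p ps ih =>
      intro res hp
      obtain ⟨hp0, hplen, hpval⟩ := hp p (List.mem_cons_self)
      have hlen1 : (setItem res p.2 (g p)).length = res.length := by
        simp [setItem]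
      obtain ⟨ihlen, ihget⟩ := ih (setItem res p.2 (g p)) (by
        intro q hq
        obtain ⟨a, b, c⟩ := hp q (List.mem_cons_of_mem _ hq)
        exact ⟨a, by omega, c⟩)
      simp only [List.foldl_cons]
      refine ⟨by rw [ihlen, hlen1], ?_⟩
      intro i
      rw [ihget i, List.any_cons]
      by_cases hrest : ps.any (fun q => q.2 == (i : Int)) = true
      · simp [hrest]
      · have hfalse : (ps.any fun q => q.2 == (i : Int)) = false := Bool.eq_false_iff.2 hrest
        rw [hfalse]
        simp only [Bool.or_false, Bool.false_eq_true, if_false]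
        have hres1 : (setItem res p.2 (g p))[i]? =
            if (p.2 == (i : Int)) = true then some (F i) else res[i]? := by
          simp only [setItem, List.getElem?_set]
          by_cases hpi : p.2 = (i : Int)
          · have hti : p.2.toNat = i := by omega
            have hlt : i < res.length := hti ▸ hplen
            simp [hpi, hlt, hpval]
          · have hti : p.2.toNat ≠ i := by omega
            simp [hti, hpi]
        rw [hres1]

lemma any_enumerate_snd (xs : List Int) (s : Int) (i : Nat) :
    ((PySem.List.enumerate xs s).any fun q => q.2 == (i : Int)) = xs.any fun e => e == (i : Int) := by
  conv_rhs => rw [← PySem.List.map_snd_enumerate xs s]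
  rw [List.any_map]
  rfl

-- outer loop of B over the groups
lemma foldl_group_spec (full : List String) :
    ∀ (its : List (String × List Int)) (res : List String), res.length = full.length →
    (∀ pr ∈ its, pr.2 = occI pr.1 full 0) →
    ((its.foldl writeGroup res).length = full.length ∧
     ∀ i : Nat, (its.foldl writeGroup res)[i]? =
       if its.any (fun pr => pr.2.any (fun e => e == (i : Int))) then some (specF full i)
       else res[i]?) := by
  intro its
  induction its with
  | nil => intro res hlen _; simp [hlen]
  | cons pr its ih =>
      intro res hlen hocc
      have hpr : pr.2 = occI pr.1 full 0 := hocc pr (List.mem_cons_self)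
      have hk : pr.2.length = full.count pr.1 := by rw [hpr, length_occI]
      -- one group's scatter
      obtain ⟨glen, gget⟩ := foldl_setItem_spec
        (fun q => mkmFix (if (pr.2.length : Int) == 1 then pr.1
          else pr.1 ++ "-Version-" ++ PySem.Int.toStr ((pr.2.length : Int) - q.1)))
        (specF full) (PySem.List.enumerate pr.2 0) res (by
          intro q hq
          obtain ⟨j, hj, rfl⟩ := (PySem.List.mem_enumerate_iff _ _ _).1 hq
          have hj' : j < (occI pr.1 full 0).length := by rw [← hpr]; exact hj
          obtain ⟨b0, b1, b2, b3⟩ := getElem_occI pr.1 full 0 j hj'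
          simp only [Int.sub_zero] at b0 b1 b2 b3
          have hjj : pr.2[j] = (occI pr.1 full 0)[j]'hj' := List.getElem_of_eq hpr hj
          refine ⟨by rw [hjj]; exact b0, by rw [hjj, hlen]; exact b1, ?_⟩
          rw [hjj]
          dsimp only
          unfold specF
          rw [b2]
          by_cases h1 : List.count pr.1 full = 1
          · rw [if_pos h1]
            simp [hk, h1]
          · rw [if_neg h1, b3]
            have hlne : pr.2.length ≠ 1 := by rw [hk]; exact h1
            have hne : ((pr.2.length : Int) == 1) = false := by simpa using hlne
            simp only [hne, Bool.false_eq_true, if_false]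
            have hj2 : j < List.count pr.1 full := hk ▸ hj
            have harg : (pr.2.length : Int) - (0 + (j : Int))
                = ((List.count pr.1 full - j : Nat) : Int) := by rw [hk]; omega
            rw [harg])
      obtain ⟨ihlen, ihget⟩ := ih (writeGroup res pr)
        (by unfold writeGroup; rw [glen]; exact hlen)
        (fun q hq => hocc q (List.mem_cons_of_mem _ hq))
      simp only [List.foldl_cons]
      refine ⟨ihlen, ?_⟩
      intro i
      rw [ihget i, List.any_cons]
      by_cases hrest : its.any (fun pr => pr.2.any (fun e => e == (i : Int))) = true
      · simp [hrest]
      · have hfalse : (its.any fun pr => pr.2.any fun e => e == (i : Int)) = false :=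
          Bool.eq_false_iff.2 hrest
        rw [hfalse]
        simp only [Bool.or_false, Bool.false_eq_true, if_false]
        unfold writeGroup
        rw [gget i, any_enumerate_snd pr.2 0 i]

lemma B_eq_spec (names : List String) :
    card_name_corrector_alt names = (List.range names.length).map (specF names) := by
  rw [show card_name_corrector_alt names
      = (((PySem.List.enumerate names 0).foldl
          (fun g p => g.modify p.2 [] (fun l => l ++ [p.1])) PySem.Dict.empty).items.foldl
            writeGroup (List.replicate names.length "")) from rfl]
  have hkeys : ((PySem.List.enumerate names 0).foldl
      (fun g p => g.modify p.2 [] (fun l => l ++ [p.1])) PySem.Dict.empty).keys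
      = PySem.Set.ofList names := by
    rw [PySem.Dict.keys_foldl_modify_key (PySem.List.enumerate names 0) (fun p => p.2) []
        (fun _ p => fun l => l ++ [p.1]) PySem.Dict.empty]
    rw [PySem.List.map_snd_enumerate]
    simp [PySem.Set.update_nil_left]
  have hnodup : ((PySem.List.enumerate names 0).foldl
      (fun g p => g.modify p.2 [] (fun l => l ++ [p.1])) PySem.Dict.empty).keys.Nodup := by
    rw [hkeys]
    exact PySem.Set.nodup_ofList names
  have hgetD : ∀ nm, ((PySem.List.enumerate names 0).foldl
      (fun g p => g.modify p.2 [] (fun l => l ++ [p.1])) PySem.Dict.empty).getD nm []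
      = occI nm names 0 := by
    intro nm
    have hswap : (PySem.List.enumerate names 0).foldl
        (fun g p => g.modify p.2 [] (fun l => l ++ [p.1])) PySem.Dict.empty
        = ((PySem.List.enumerate names 0).map (fun p => (p.2, p.1))).foldl
            (fun g q => g.modify q.1 [] (fun l => l ++ [q.2])) PySem.Dict.empty := by
      rw [List.foldl_map]
    rw [hswap, PySem.Dict.getD_foldl_modify_append]
    rw [List.filter_map, List.map_map]
    rw [← occI_eq_filter nm names 0]
    rfl
  have hitems : ((PySem.List.enumerate names 0).foldl
      (fun g p => g.modify p.2 [] (fun l => l ++ [p.1])) PySem.Dict.empty).items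
      = (PySem.Set.ofList names).map (fun nm => (nm, occI nm names 0)) := by
    rw [PySem.Dict.items_eq_map_keys _ hnodup [], hkeys]
    exact List.map_congr_left (fun nm _ => by rw [hgetD nm])
  rw [hitems]
  obtain ⟨hlen, hget⟩ := foldl_group_spec names
    ((PySem.Set.ofList names).map (fun nm => (nm, occI nm names 0)))
    (List.replicate names.length "") (by simp)
    (by
      intro pr hpr
      obtain ⟨nm, _, rfl⟩ := List.mem_map.1 hpr
      rfl)
  apply List.ext_getElem?
  intro i
  rw [hget i]
  by_cases hi : i < names.length
  · have hcov : ((List.map (fun nm => (nm, occI nm names 0)) (PySem.Set.ofList names)).any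
        fun pr => pr.2.any fun e => e == (i : Int)) = true := by
      rw [List.any_eq_true]
      refine ⟨(names[i], occI names[i] names 0),
        List.mem_map.2 ⟨names[i], ?_, rfl⟩, ?_⟩
      · rw [PySem.Set.mem_ofList]
        exact List.getElem_mem hi
      · rw [List.any_eq_true]
        refine ⟨(i : Int), ?_, by simp⟩
        have := mem_occI_self names 0 i hi
        simpa using this
    rw [if_pos hcov, List.getElem?_map, List.getElem?_range hi]
    rfl
  · have hncov : ((List.map (fun nm => (nm, occI nm names 0)) (PySem.Set.ofList names)).any
        fun pr => pr.2.any fun e => e == (i : Int)) = false := by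
      rw [Bool.eq_false_iff]
      intro hany
      obtain ⟨pr, hpr, hin⟩ := List.any_eq_true.1 hany
      obtain ⟨nm, _, rfl⟩ := List.mem_map.1 hpr
      obtain ⟨e, he, heq⟩ := List.any_eq_true.1 hin
      have hb := occI_bounds nm names 0 e he
      have : e = (i : Int) := by simpa using heq
      omega
    rw [hncov]
    simp only [Bool.false_eq_true, if_false]
    rw [List.getElem?_eq_none (by simpa using hi),
        List.getElem?_eq_none (by simp; omega)]

-- ===== VERDICT (by name: the statement is the Claim_ definition above) =====
theorem card_name_corrector_spec : Claim_equal_card_name_corrector := by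
  intro names _
  unfold Spec_card_name_corrector
  rw [A_eq_spec, B_eq_spec]
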